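-- pv_equiv track=rewrite | github.com/ThiagoValle98/Processo-Seletivo | ex10CI&T.py | shuffle_musicas
-- ===== SOURCE A (Python) =====
-- def shuffle_musicas(musicas_tocadas):
--     musicas_tocadas = list(musicas_tocadas)
--     lista = []
--     for i in range (len(musicas_tocadas)):
--         if i % 2 == 0:
--             lista.append(max(musicas_tocadas))
--             musicas_tocadas.remove(max(musicas_tocadas))
--         else:
--             lista.append(min(musicas_tocadas))
--             musicas_tocadas.remove(min(musicas_tocadas))
--     return lista
-- ===== SOURCE B (Python) =====
-- def shuffle_musicas(musicas_tocadas):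
--     s = sorted(musicas_tocadas)
--     out = []
--     lo, hi = 0, len(s) - 1
--     while lo <= hi:
--         out.append(s[hi])
--         hi -= 1
--         if lo <= hi:
--             out.append(s[lo])
--             lo += 1
--     return out
-- ===== Notes on version B (the rewrite author's own statement) =====
-- stated objective: faster
-- what changed: Instead of repeatedly scanning for and removing the max/min of the remaining list (quadratic), B sorts once and picks elements alternately from the high and low ends with two index pointers.
import Mathlib
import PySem

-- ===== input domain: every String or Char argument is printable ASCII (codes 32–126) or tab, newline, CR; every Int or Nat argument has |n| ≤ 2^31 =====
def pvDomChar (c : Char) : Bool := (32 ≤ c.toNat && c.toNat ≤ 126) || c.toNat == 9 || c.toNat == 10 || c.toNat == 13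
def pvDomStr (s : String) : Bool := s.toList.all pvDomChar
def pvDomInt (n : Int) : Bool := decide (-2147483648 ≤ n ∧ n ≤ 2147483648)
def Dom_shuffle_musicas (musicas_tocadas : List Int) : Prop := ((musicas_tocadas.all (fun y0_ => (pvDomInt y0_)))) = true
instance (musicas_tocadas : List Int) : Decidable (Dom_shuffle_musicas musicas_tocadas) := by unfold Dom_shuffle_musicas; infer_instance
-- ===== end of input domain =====

-- B replaces A's repeated max/min scan-and-remove with one sort plus two index pointers picking
-- alternately from the high and low ends (faster).


-- ===== PORT A =====
-- one iteration of A's for-loop body (state = (remaining list, output list); i = the loop index).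
-- Python's max/min raise ValueError on an empty list; the 'none' branches are that case and are
-- unreachable here: the loop runs length-many iterations and each one removes exactly one element.
def stepA (st : List Int × List Int) (i : Int) : List Int × List Int :=
  if PySem.Int.mod i 2 == 0 then
    match PySem.List.max? st.1 (fun x => x) with
    | some m =>
      match PySem.List.remove? st.1 m with
      | some c => (c, st.2 ++ [m])
      | none => (st.1, st.2 ++ [m])
    | none => st
  else
    match PySem.List.min? st.1 (fun x => x) with
    | some m =>
      match PySem.List.remove? st.1 m with
      | some c => (c, st.2 ++ [m])
      | none => (st.1, st.2 ++ [m])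
    | none => st

def shuffle_musicas (musicas_tocadas : List Int) : List Int :=
  ((PySem.List.pyRange 0 (musicas_tocadas.length : Int) 1).foldl stepA (musicas_tocadas, [])).2

-- ===== PORT B =====
-- the while-loop of Source B; both indexings s[hi] and s[lo] are in range whenever they are reached
-- (0 ≤ lo ≤ hi < len(s)), so pyGetD is exact there
def altLoopB (s : List Int) (lo hi : Int) (out : List Int) : List Int :=
  if _h : lo ≤ hi then
    let out2 := out ++ [PySem.List.pyGetD s hi 0]
    if _h2 : lo ≤ hi - 1 then
      altLoopB s (lo + 1) (hi - 1) (out2 ++ [PySem.List.pyGetD s lo 0])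
    else
      altLoopB s lo (hi - 1) out2
  else out
termination_by (hi + 1 - lo).toNat
decreasing_by all_goals omega

def shuffle_musicas_alt (musicas_tocadas : List Int) : List Int :=
  let s := PySem.List.sorted musicas_tocadas (fun x => x) false
  altLoopB s 0 ((s.length : Int) - 1) []

-- ===== PRECONDITION & SPEC =====
def Spec_shuffle_musicas (musicas_tocadas : List Int) (out : List Int) : Prop := out = shuffle_musicas_alt musicas_tocadas
instance (musicas_tocadas : List Int) (out : List Int) : Decidable (Spec_shuffle_musicas musicas_tocadas out) := by unfold Spec_shuffle_musicas; infer_instance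

-- ===== CLAIM (what is proved, stated in full; the proofs are below) =====
def Claim_equal_shuffle_musicas : Prop := ∀ (musicas_tocadas : List Int), Dom_shuffle_musicas musicas_tocadas → Spec_shuffle_musicas musicas_tocadas (shuffle_musicas musicas_tocadas)

-- ===== LEMMAS AND PROOFS =====

-- the common value of both programs: alternately take the last / first element of a sorted list
def ilv : Nat → Bool → List Int → List Int
  | 0, _, _ => []
  | Nat.succ n, true, t => t.getLastD 0 :: ilv n false t.dropLast
  | Nat.succ n, false, t => t.headD 0 :: ilv n true t.tail

-- A's even step: max(cur) is the last element of sorted(cur), and removing it leaves a list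
-- whose sorted form is dropLast of sorted(cur)
theorem max_step (cur : List Int) (h : cur ≠ []) :
    ∃ m, PySem.List.max? cur (fun x => x) = some m ∧
      PySem.List.remove? cur m = some (cur.erase m) ∧
      m = (PySem.List.sorted cur (fun x => x) false).getLastD 0 ∧
      PySem.List.sorted (cur.erase m) (fun x => x) false
        = (PySem.List.sorted cur (fun x => x) false).dropLast := by
  have hsne : PySem.List.sorted cur (fun x => x) false ≠ [] := by
    simpa [PySem.List.sorted_eq_nil_iff] using h
  have hperm : (PySem.List.sorted cur (fun x => x) false).Perm cur :=
    PySem.List.sorted_perm cur _ false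
  obtain ⟨m, hm⟩ : ∃ m, PySem.List.max? cur (fun x => x) = some m := by
    cases hmx : PySem.List.max? cur (fun x => x) with
    | none => exact absurd ((PySem.List.max?_eq_none_iff cur _).mp hmx) h
    | some m => exact ⟨m, rfl⟩
  have hmem : m ∈ cur := PySem.List.max?_mem hm
  have hmax : ∀ y ∈ cur, y ≤ m := fun y hy => PySem.List.max?_isMax hm y hy
  have hz : (PySem.List.sorted cur (fun x => x) false).getLast hsne
      ∈ PySem.List.sorted cur (fun x => x) false := List.getLast_mem hsne
  have hzc := (PySem.List.mem_sorted cur _ false _).mp hz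
  have hzm : (PySem.List.sorted cur (fun x => x) false).getLast hsne ≤ m := hmax _ hzc
  have hms : m ∈ PySem.List.sorted cur (fun x => x) false :=
    (PySem.List.mem_sorted cur _ false m).mpr hmem
  have hmz : m ≤ (PySem.List.sorted cur (fun x => x) false).getLast hsne := by
    obtain ⟨p, hp, hpe⟩ := List.getElem_of_mem hms
    have hmono := PySem.List.sorted_id_getElem_mono cur
      (p := p) (q := (PySem.List.sorted cur (fun x => x) false).length - 1)
      (by omega) (by omega)
    rw [hpe, ← List.getLast_eq_getElem] at hmono
    exact hmono
  have hmeq : m = (PySem.List.sorted cur (fun x => x) false).getLast hsne :=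
    le_antisymm hmz hzm
  have hsplit : (PySem.List.sorted cur (fun x => x) false).dropLast ++ [m]
      = PySem.List.sorted cur (fun x => x) false := by
    rw [hmeq]; exact List.dropLast_append_getLast hsne
  have hpermE : (cur.erase m).Perm (PySem.List.sorted cur (fun x => x) false).dropLast := by
    have h1 := hperm.erase m
    have h2 : (PySem.List.sorted cur (fun x => x) false).Perm
        (m :: (PySem.List.sorted cur (fun x => x) false).dropLast) := by
      conv_lhs => rw [← hsplit]
      exact List.perm_append_singleton m _
    have h3 := h2.erase m
    rw [List.erase_cons_head] at h3
    exact (h1.symm.trans h3)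
  refine ⟨m, hm, PySem.List.remove?_eq_some_erase cur m hmem, ?_, ?_⟩
  · rw [hmeq, List.getLastD_eq_getLast?, List.getLast?_eq_some_getLast hsne]; rfl
  · refine PySem.List.sorted_id_eq_of_perm_of_pairwise _ _ hpermE.symm ?_
    exact (PySem.List.sorted_pairwise cur _).sublist (List.dropLast_sublist _)

-- A's odd step: min(cur) is the head of sorted(cur), and removing it leaves the tail
theorem min_step (cur : List Int) (h : cur ≠ []) :
    ∃ m, PySem.List.min? cur (fun x => x) = some m ∧
      PySem.List.remove? cur m = some (cur.erase m) ∧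
      m = (PySem.List.sorted cur (fun x => x) false).headD 0 ∧
      PySem.List.sorted (cur.erase m) (fun x => x) false
        = (PySem.List.sorted cur (fun x => x) false).tail := by
  have hsne : PySem.List.sorted cur (fun x => x) false ≠ [] := by
    simpa [PySem.List.sorted_eq_nil_iff] using h
  have hperm : (PySem.List.sorted cur (fun x => x) false).Perm cur :=
    PySem.List.sorted_perm cur _ false
  obtain ⟨m, hm⟩ : ∃ m, PySem.List.min? cur (fun x => x) = some m := by
    cases hmx : PySem.List.min? cur (fun x => x) with
    | none => exact absurd ((PySem.List.min?_eq_none_iff cur _).mp hmx) h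
    | some m => exact ⟨m, rfl⟩
  have hmem : m ∈ cur := PySem.List.min?_mem hm
  have hmin : ∀ y ∈ cur, m ≤ y := fun y hy => PySem.List.min?_isMin hm y hy
  obtain ⟨z, t, hzt⟩ := List.exists_cons_of_ne_nil hsne
  have hzc : z ∈ cur := (PySem.List.mem_sorted cur _ false z).mp (by rw [hzt]; simp)
  have hzm : m ≤ z := hmin z hzc
  have hmz : z ≤ m := PySem.List.key_head_sorted_le cur _ hzt m hmem
  have hmeq : m = z := le_antisymm hzm hmz
  have hpermE : (cur.erase m).Perm t := by
    have h1 := hperm.erase m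
    have h2 : (PySem.List.sorted cur (fun x => x) false).erase m = t := by
      rw [hzt, hmeq, List.erase_cons_head]
    rw [h2] at h1
    exact h1.symm
  refine ⟨m, hm, PySem.List.remove?_eq_some_erase cur m hmem, ?_, ?_⟩
  · rw [hmeq, hzt]; rfl
  · rw [hzt]
    refine PySem.List.sorted_id_eq_of_perm_of_pairwise _ _ hpermE.symm ?_
    have hpw := PySem.List.sorted_pairwise cur (fun x : Int => x)
    rw [hzt] at hpw
    exact (List.pairwise_cons.mp hpw).2

theorem parity_int (k : Nat) : ((PySem.Int.mod (k:Int) 2) == 0) = (k % 2 == 0) := by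
  rw [show (2:Int) = ((2:Nat):Int) by norm_num, PySem.Int.mod_natCast]
  rcases Nat.mod_two_eq_zero_or_one k with h | h <;> simp [h]

-- A's loop, started at index k with the invariant 'length of the remaining list = iterations left',
-- appends exactly the alternating extraction of the sorted remaining list
theorem A_side : ∀ (fuel k : Nat) (cur acc : List Int), cur.length = fuel →
    ((PySem.List.pyRange (k : Int) ((k + fuel : Nat) : Int) 1).foldl stepA (cur, acc)).2
      = acc ++ ilv fuel (k % 2 == 0) (PySem.List.sorted cur (fun x => x) false) := by
  intro fuel
  induction fuel with
  | zero =>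
    intro k cur acc _
    simp [pysem, ilv]
  | succ n ih =>
    intro k cur acc hlen
    have hcne : cur ≠ [] := by
      intro hnil; rw [hnil] at hlen; simp at hlen
    have hmemlen : ∀ m : Int, m ∈ cur → (cur.erase m).length = n := by
      intro m hm
      rw [List.length_erase_of_mem hm, hlen]
      omega
    rw [show ((k + (n+1) : Nat) : Int) = (((k+1+n : Nat)) : Int) by push_cast; ring]
    rw [PySem.List.pyRange_one_cons (by push_cast; omega)]
    simp only [List.foldl_cons]
    rw [show ((k:Int) + 1) = (((k+1 : Nat)) : Int) by push_cast; ring]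
    by_cases hk : k % 2 = 0
    · obtain ⟨m, hm, hrem, hml, hsor⟩ := max_step cur hcne
      have hstep : stepA (cur, acc) (k:Int) = (cur.erase m, acc ++ [m]) := by
        unfold stepA
        rw [parity_int]
        simp only [hk]
        simp [hm, hrem]
      rw [hstep]
      rw [ih (k+1) (cur.erase m) (acc ++ [m]) (hmemlen m (PySem.List.max?_mem hm))]
      have hk1 : (k+1) % 2 = 1 := by omega
      simp only [hk, hk1, hsor]
      rw [hml]; simp [ilv]
    · obtain ⟨m, hm, hrem, hml, hsor⟩ := min_step cur hcne
      have hstep : stepA (cur, acc) (k:Int) = (cur.erase m, acc ++ [m]) := by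
        unfold stepA
        rw [parity_int]
        have : (k % 2 == 0) = false := by simpa using hk
        simp only [this]
        simp [hm, hrem]
      rw [hstep]
      rw [ih (k+1) (cur.erase m) (acc ++ [m]) (hmemlen m (PySem.List.min?_mem hm))]
      have hk1 : (k+1) % 2 = 0 := by omega
      have hkb : (k % 2 == 0) = false := by simpa using hk
      simp only [hkb, hk1, hsor]
      rw [hml]; simp [ilv]

theorem getLastD_eq_getElem (l : List Int) (h : 0 < l.length) : l.getLastD 0 = l[l.length-1] := by
  have hne : l ≠ [] := by intro hh; rw [hh] at h; simp at h
  rw [List.getLastD_eq_getLast?, List.getLast?_eq_getElem?, List.getElem?_eq_getElem (by omega)]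
  rfl

theorem headD_eq_getElem (l : List Int) (h : 0 < l.length) : l.headD 0 = l[0] := by
  cases l with
  | nil => simp at h
  | cons x t => simp

theorem dropLast_take (l : List Int) (n : Nat) (h : n ≤ l.length) : (l.take n).dropLast = l.take (n-1) := by
  rw [List.dropLast_eq_take, List.take_take]
  congr 1
  simp [List.length_take]
  omega

theorem tail_take (l : List Int) (n : Nat) : (l.take n).tail = l.tail.take (n-1) := by
  rw [← List.drop_one, ← List.drop_one, List.drop_take]

-- B's two-pointer loop on the window s[lo..hi] appends exactly the alternating extraction of that window
theorem B_side : ∀ (s : List Int) (fuel : Nat) (lo hi : Int) (out : List Int),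
    0 ≤ lo → hi < (s.length : Int) → (hi + 1 - lo).toNat = fuel →
    altLoopB s lo hi out = out ++ ilv fuel true ((s.drop lo.toNat).take fuel) := by
  intro s fuel
  induction fuel using Nat.strong_induction_on with
  | _ fuel ih =>
    intro lo hi out h0 h1 hf
    by_cases h : lo ≤ hi
    · by_cases h2 : lo ≤ hi - 1
      · obtain ⟨n, rfl⟩ : ∃ n, fuel = n + 2 := ⟨fuel - 2, by omega⟩
        rw [altLoopB]
        simp only [dif_pos h, dif_pos h2]
        rw [ih n (by omega) (lo+1) (hi-1) _ (by omega) (by omega) (by omega)]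
        set a := lo.toNat with ha
        have haeq : (a : Int) = lo := Int.toNat_of_nonneg h0
        have hhi : (hi.toNat : Int) = hi := Int.toNat_of_nonneg (by omega)
        have hdlen : (s.drop a).length = s.length - a := by simp
        have hlen2 : n + 2 ≤ (s.drop a).length := by omega
        have hseglen : ((s.drop a).take (n+2)).length = n + 2 := by
          simp [List.length_take]; omega
        have hA : PySem.List.pyGetD s hi 0 = ((s.drop a).take (n+2)).getLastD 0 := by
          rw [PySem.List.pyGetD_eq_getElem s 0 (by omega) h1]
          rw [getLastD_eq_getElem _ (by omega)]
          simp only [hseglen, List.getElem_take, List.getElem_drop]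
          congr 1
          omega
        have hB : PySem.List.pyGetD s lo 0 = ((s.drop a).take (n+2)).dropLast.headD 0 := by
          rw [PySem.List.pyGetD_eq_getElem s 0 h0 (by omega)]
          rw [headD_eq_getElem _ (by simp [List.length_dropLast, hseglen])]
          simp only [List.getElem_dropLast, List.getElem_take, List.getElem_drop]
          try congr 1
          try omega
        have hC : ((s.drop a).take (n+2)).dropLast.tail = (s.drop (lo+1).toNat).take n := by
          rw [dropLast_take _ _ hlen2]
          have : n + 2 - 1 = n + 1 := by omega
          rw [this, tail_take, List.tail_drop]
          have : (lo + 1).toNat = a + 1 := by omega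
          rw [this]
          congr 1
        show out ++ [PySem.List.pyGetD s hi 0] ++ [PySem.List.pyGetD s lo 0] ++ _ = _
        rw [show (n + 2) = (n+1) + 1 by rfl]
        rw [ilv]
        rw [show (n + 1) = n + 1 by rfl]
        rw [ilv]
        rw [hA, hB, hC]
        simp
      · have hlohi : lo = hi := by omega
        obtain rfl : fuel = 1 := by omega
        rw [altLoopB]
        simp only [dif_pos h, dif_neg h2]
        rw [ih 0 (by omega) lo (hi-1) _ (by omega) (by omega) (by omega)]
        set a := lo.toNat with ha
        have haeq : (a : Int) = lo := Int.toNat_of_nonneg h0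
        have hdlen : (s.drop a).length = s.length - a := by simp
        have hA : PySem.List.pyGetD s hi 0 = ((s.drop a).take 1).getLastD 0 := by
          have hl1 : ((s.drop a).take 1).length = 1 := by simp [List.length_take]; omega
          rw [PySem.List.pyGetD_eq_getElem s 0 (by omega) h1]
          rw [getLastD_eq_getElem _ (by omega)]
          simp only [hl1, List.getElem_take, List.getElem_drop]
          congr 1
          omega
        rw [ilv, hA]
        simp [ilv]
    · obtain rfl : fuel = 0 := by omega
      rw [altLoopB]
      simp [h, ilv]

-- ===== VERDICT (by name: the statement is the Claim_ definition above) =====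
theorem shuffle_musicas_spec : Claim_equal_shuffle_musicas := by
  intro l _
  unfold Spec_shuffle_musicas shuffle_musicas shuffle_musicas_alt
  have hA := A_side l.length 0 l [] rfl
  simp only [Nat.cast_zero, Nat.zero_add] at hA
  have hslen : (PySem.List.sorted l (fun x => x) false).length = l.length :=
    PySem.List.length_sorted l _ false
  have hB := B_side (PySem.List.sorted l (fun x => x) false) l.length 0
      ((l.length : Int) - 1) [] (le_refl 0) (by rw [hslen]; omega) (by omega)
  simp only [hslen]
  rw [hA, hB]
  simp only [List.nil_append, Int.toNat_zero, List.drop_zero]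
  congr 1
  conv_rhs => rw [← hslen, List.take_length]
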